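-- pv_equiv track=rewrite | github.com/mike006322/ProjectEuler | Solutions/PE040_champerownes_constant/champerownes_constant.py | make_lookup_table
-- ===== SOURCE A (Python) =====
-- def make_lookup_table(n):
--     """
--     n is the max number of digits the table goes to
--     """
--     lookop_table = list()
--     digit_number = 0
--     for i in range(1, n+1):
--         begin = digit_number + 1
--         end = digit_number + 9*i*10**(i-1)
--         digit_number = end
--         lookop_table.append((begin, end))
--         # index of the lookuptable + 1 is the number of digits of the number
--     return lookop_table
-- ===== SOURCE B (Python) =====
-- def make_lookup_table(n):
--     """
--     n is the max number of digits the table goes to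
--     """
--     def entry(i):
--         # closed form: cumulative digit count up to all j-digit numbers is (10**j*(9*j-1)+1)//9
--         p = 10 ** (i - 1)
--         return ((p * (9 * i - 10) + 1) // 9 + 1, (10 * p * (9 * i - 1) + 1) // 9)
--     return [entry(i) for i in range(1, n + 1)]
-- ===== Notes on version B (the rewrite author's own statement) =====
-- stated objective: alternative
-- what changed: Each table entry is computed independently from a closed-form cumulative-digit-count formula via a list comprehension, removing A's running digit_number accumulator.
import Mathlib
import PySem

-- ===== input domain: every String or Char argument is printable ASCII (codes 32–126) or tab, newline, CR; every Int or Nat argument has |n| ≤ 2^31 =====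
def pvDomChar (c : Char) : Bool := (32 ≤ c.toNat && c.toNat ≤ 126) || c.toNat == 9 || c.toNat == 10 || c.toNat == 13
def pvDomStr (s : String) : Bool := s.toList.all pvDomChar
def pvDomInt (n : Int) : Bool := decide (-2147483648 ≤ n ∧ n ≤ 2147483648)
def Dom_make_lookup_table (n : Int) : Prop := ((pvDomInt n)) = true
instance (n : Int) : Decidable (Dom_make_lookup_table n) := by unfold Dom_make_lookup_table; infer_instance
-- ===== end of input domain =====

-- B replaces A's running-accumulator loop by independent closed-form entries (objective: alternative).

-- ===== PORT A =====
-- A: for i in range(1, n+1): begin = d+1; end = d + 9*i*10**(i-1); d = end; append (begin, end)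
def make_lookup_table (n : Int) : List (Int × Int) :=
  (List.foldl
    (fun (st : List (Int × Int) × Int) (i : Int) =>
      let begin_ := st.2 + 1
      let end_ := st.2 + 9 * i * 10 ^ (i - 1).toNat
      (st.1 ++ [(begin_, end_)], end_))
    ([], 0) (PySem.List.pyRange 1 (n + 1) 1)).1

-- ===== PORT B =====
-- B's helper entry(i): p = 10**(i-1); ((p*(9*i-10)+1)//9 + 1, (10*p*(9*i-1)+1)//9)
def pvEntry (i : Int) : Int × Int :=
  let p : Int := 10 ^ (i - 1).toNat
  (PySem.Int.floordiv (p * (9 * i - 10) + 1) 9 + 1,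
   PySem.Int.floordiv (10 * p * (9 * i - 1) + 1) 9)

def make_lookup_table_alt (n : Int) : List (Int × Int) :=
  (PySem.List.pyRange 1 (n + 1) 1).map pvEntry

-- ===== PRECONDITION & SPEC =====
def Spec_make_lookup_table (n : Int) (out : List (Int × Int)) : Prop := out = make_lookup_table_alt n
instance (n : Int) (out : List (Int × Int)) : Decidable (Spec_make_lookup_table n out) := by unfold Spec_make_lookup_table; infer_instance

-- ===== CLAIM (what is proved, stated in full; the proofs are below) =====
def Claim_equal_make_lookup_table : Prop := ∀ (n : Int), Dom_make_lookup_table n → Spec_make_lookup_table n (make_lookup_table n)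

-- ===== LEMMAS AND PROOFS =====

-- The exact cumulative digit count, defined recursively (proof-side reference value).
def pvE : Nat → Int
  | 0 => 0
  | k + 1 => pvE k + 9 * (k + 1) * 10 ^ k

theorem pvE_nine (k : Nat) : 9 * pvE k = 10 ^ k * (9 * (k : Int) - 1) + 1 := by
  induction k with
  | zero => simp [pvE]
  | succ m ih =>
    simp only [pvE]
    push_cast
    push_cast at ih
    ring_nf
    ring_nf at ih
    nlinarith [ih]

theorem pvEntry_nat (m : Nat) : pvEntry ((m : Int) + 1) = (pvE m + 1, pvE (m + 1)) := by
  unfold pvEntry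
  have hp : ((m : Int) + 1 - 1).toNat = m := by omega
  have h1 : (10 : Int) ^ m * (9 * ((m : Int) + 1) - 10) + 1 = 9 * pvE m := by
    rw [pvE_nine m]; ring
  have h2 : 10 * (10 : Int) ^ m * (9 * ((m : Int) + 1) - 1) + 1 = 9 * pvE (m + 1) := by
    rw [pvE_nine (m + 1)]; push_cast; ring
  simp only [hp]
  rw [h1, h2, PySem.Int.floordiv_eq_ediv_of_pos (by norm_num),
      PySem.Int.floordiv_eq_ediv_of_pos (by norm_num)]
  rw [Int.mul_ediv_cancel_left _ (by norm_num), Int.mul_ediv_cancel_left _ (by norm_num)]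

-- Loop invariant: A's fold over range(1, m+1) produces B's map, and the accumulator equals pvE m.
theorem pvLoop (m : Nat) :
    (List.foldl
      (fun (st : List (Int × Int) × Int) (i : Int) =>
        let begin_ := st.2 + 1
        let end_ := st.2 + 9 * i * 10 ^ (i - 1).toNat
        (st.1 ++ [(begin_, end_)], end_))
      ([], 0) (PySem.List.pyRange 1 ((m : Int) + 1) 1))
    = ((PySem.List.pyRange 1 ((m : Int) + 1) 1).map pvEntry, pvE m) := by
  induction m with
  | zero =>
    rw [PySem.List.pyRange_one_eq_nil (by norm_num)]
    simp [pvE]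
  | succ m ih =>
    have hsplit : PySem.List.pyRange 1 ((↑(m + 1) : Int) + 1) 1
        = PySem.List.pyRange 1 ((m : Int) + 1) 1 ++ [(m : Int) + 1] := by
      have := PySem.List.pyRange_one_succ_right (a := 1) (b := (m : Int) + 1) (by omega)
      push_cast
      exact this
    rw [hsplit, List.foldl_append, ih, List.map_append]
    simp only [List.foldl, List.map]
    rw [pvEntry_nat m]
    have h2 : ((m : Int) + 1 - 1).toNat = m := by omega
    simp [pvE]

-- ===== VERDICT (by name: the statement is the Claim_ definition above) =====
theorem make_lookup_table_spec : Claim_equal_make_lookup_table := by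
  intro n _
  unfold Spec_make_lookup_table make_lookup_table make_lookup_table_alt
  by_cases h : n ≤ 0
  · rw [PySem.List.pyRange_one_eq_nil (by omega)]
    simp
  · obtain ⟨m, hm⟩ : ∃ m : Nat, n = (m : Int) := ⟨n.toNat, by omega⟩
    subst hm
    rw [pvLoop m]
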